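-- pv_equiv track=rewrite | github.com/mgnigh98/battery_security | training_data_plot.py | pick_mission_features
-- ===== SOURCE A (Python) =====
-- def pick_mission_features(cols, max_per_phase=2):
--     phases = ["takeoff_", "hover_", "cruise_", "landing_", "steady_"]
--     picked = []
--     for ph in phases:
--         ph_cols = [c for c in cols if c.startswith(ph)]
--         # prefer slope-like or delta-like features if they exist
--         preferred = [c for c in ph_cols if ("slope" in c.lower() or "dvdt" in c.lower() or "delta" in c.lower())]
--         use = preferred[:max_per_phase] if preferred else ph_cols[:max_per_phase]
--         picked.extend(use)
--     return picked
-- ===== SOURCE B (Python) =====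
-- def pick_mission_features(cols, max_per_phase=2):
--     phases = ["takeoff_", "hover_", "cruise_", "landing_", "steady_"]
--     # one pass: bucket each column into (all, preferred) for the first (= only) matching prefix
--     buckets = {ph: ([], []) for ph in phases}
--     for c in cols:
--         for ph in phases:
--             if c.startswith(ph):
--                 allc, pref = buckets[ph]
--                 allc.append(c)
--                 cl = c.lower()
--                 if "slope" in cl or "dvdt" in cl or "delta" in cl:
--                     pref.append(c)
--                 break
--     picked = []
--     for ph in phases:
--         allc, pref = buckets[ph]
--         picked.extend(pref[:max_per_phase] if pref else allc[:max_per_phase])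
--     return picked
-- ===== Notes on version B (the rewrite author's own statement) =====
-- stated objective: alternative
-- what changed: Replaces five independent scans of cols (a filter pass plus a preferred re-filter per phase) with a single bucketing pass that assigns each column once to its unique matching prefix's (all, preferred) pair, then emits per phase in fixed order.
import Mathlib
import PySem

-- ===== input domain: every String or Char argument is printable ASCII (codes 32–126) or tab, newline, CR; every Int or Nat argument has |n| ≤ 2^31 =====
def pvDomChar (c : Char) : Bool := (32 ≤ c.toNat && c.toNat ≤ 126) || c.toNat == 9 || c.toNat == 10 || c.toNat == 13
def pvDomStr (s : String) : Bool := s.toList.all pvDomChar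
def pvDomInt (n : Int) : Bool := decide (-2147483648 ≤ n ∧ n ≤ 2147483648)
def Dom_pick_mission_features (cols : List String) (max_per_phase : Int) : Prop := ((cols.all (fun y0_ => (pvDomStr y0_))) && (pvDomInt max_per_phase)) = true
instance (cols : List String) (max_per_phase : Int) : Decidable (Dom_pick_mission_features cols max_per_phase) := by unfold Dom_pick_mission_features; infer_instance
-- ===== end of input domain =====

-- B buckets each column once into (all, preferred) per prefix in a single pass instead of A's five scans; same result.

-- ===== PORT A =====
def pvPhases : List String := ["takeoff_", "hover_", "cruise_", "landing_", "steady_"]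

-- "slope" in c.lower() or "dvdt" in c.lower() or "delta" in c.lower()
def pvPreferred (c : String) : Bool :=
  PySem.Str.isIn "slope" (PySem.Str.lower c) || PySem.Str.isIn "dvdt" (PySem.Str.lower c) ||
    PySem.Str.isIn "delta" (PySem.Str.lower c)

def pick_mission_features (cols : List String) (max_per_phase : Int) : List String :=
  pvPhases.foldl (fun picked ph =>
    let ph_cols := cols.filter (fun c => PySem.Str.startswith c ph)
    let preferred := ph_cols.filter pvPreferred
    let use := if preferred = [] then PySem.List.slice ph_cols none (some max_per_phase)
               else PySem.List.slice preferred none (some max_per_phase)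
    picked ++ use) []

-- ===== PORT B =====
-- inner 'for ph in phases: if c.startswith(ph): …; break'
def pvBucketAdd (d : PySem.Dict String (List String × List String)) (c : String) :
    List String → PySem.Dict String (List String × List String)
  | [] => d
  | ph :: rest =>
    if PySem.Str.startswith c ph then
      let b := d.getD ph ([], [])
      d.insert ph (b.1 ++ [c], if pvPreferred c then b.2 ++ [c] else b.2)
    else pvBucketAdd d c rest

def pick_mission_features_alt (cols : List String) (max_per_phase : Int) : List String :=
  let d0 := pvPhases.foldl (fun d ph => d.insert ph ([], [])) PySem.Dict.empty
  let d := cols.foldl (fun d c => pvBucketAdd d c pvPhases) d0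
  pvPhases.foldl (fun picked ph =>
    let b := d.getD ph ([], [])
    picked ++ (if b.2 = [] then PySem.List.slice b.1 none (some max_per_phase)
               else PySem.List.slice b.2 none (some max_per_phase))) []

-- ===== PRECONDITION & SPEC =====
def Spec_pick_mission_features (cols : List String) (max_per_phase : Int) (out : List String) : Prop := out = pick_mission_features_alt cols max_per_phase
instance (cols : List String) (max_per_phase : Int) (out : List String) : Decidable (Spec_pick_mission_features cols max_per_phase out) := by unfold Spec_pick_mission_features; infer_instance

-- ===== CLAIM (what is proved, stated in full; the proofs are below) =====
def Claim_equal_pick_mission_features : Prop := ∀ (cols : List String) (max_per_phase : Int), Dom_pick_mission_features cols max_per_phase → Spec_pick_mission_features cols max_per_phase (pick_mission_features cols max_per_phase)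

-- ===== LEMMAS AND PROOFS =====

-- a nonempty prefix fixes the first character
theorem pv_sw_head (c p : String) (h : PySem.Str.startswith c p = true) (hp : p.toList ≠ []) :
    c.toList.head? = p.toList.head? := by
  have h' : p.toList <+: c.toList := by
    have := (PySem.Chars.startswith_iff (s := c.toList) (p := p.toList)).mp (by simpa using h)
    exact this
  obtain ⟨t, ht⟩ := h'
  cases hpl : p.toList with
  | nil => exact absurd hpl hp
  | cons a l => rw [← ht, hpl]; rfl

-- the five prefixes are pairwise non-overlapping (distinct first characters)
theorem pv_disj (c ph ph' : String) (hph : ph ∈ pvPhases) (hph' : ph' ∈ pvPhases)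
    (h : PySem.Str.startswith c ph = true) (h' : PySem.Str.startswith c ph' = true) : ph' = ph := by
  fin_cases hph <;> fin_cases hph' <;>
    first
      | rfl
      | (exfalso
         have e1 := pv_sw_head c _ h (by decide)
         have e2 := pv_sw_head c _ h' (by decide)
         rw [e1] at e2
         simp at e2)

theorem pvBucketAdd_getD_of_not_sw (d : PySem.Dict String (List String × List String)) (c ph : String)
    (h : PySem.Str.startswith c ph = false) :
    ∀ phs, (pvBucketAdd d c phs).getD ph ([], []) = d.getD ph ([], []) := by
  intro phs
  induction phs with
  | nil => rfl
  | cons p rest ih =>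
    rw [pvBucketAdd]
    by_cases hs : PySem.Str.startswith c p = true
    · have hne : ph ≠ p := by intro he; rw [he] at h; rw [h] at hs; exact Bool.noConfusion hs
      rw [if_pos hs]
      simp [PySem.Dict.getD, PySem.Dict.get?_insert, hne]
    · rw [if_neg (by simpa using hs)]
      exact ih

theorem pvBucketAdd_getD_of_sw (d : PySem.Dict String (List String × List String)) (c ph : String)
    (hsw : PySem.Str.startswith c ph = true) (hph : ph ∈ pvPhases) :
    (pvBucketAdd d c pvPhases).getD ph ([], []) =
      ((d.getD ph ([], [])).1 ++ [c],
       if pvPreferred c then (d.getD ph ([], [])).2 ++ [c] else (d.getD ph ([], [])).2) := by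
  have key : ∀ phs, ph ∈ phs → (∀ p ∈ phs, p ∈ pvPhases) →
      (pvBucketAdd d c phs).getD ph ([], []) =
        ((d.getD ph ([], [])).1 ++ [c],
         if pvPreferred c then (d.getD ph ([], [])).2 ++ [c] else (d.getD ph ([], [])).2) := by
    intro phs
    induction phs with
    | nil => intro h; exact absurd h (List.not_mem_nil)
    | cons p rest ih =>
      intro hmem hsub
      rw [pvBucketAdd]
      by_cases hs : PySem.Str.startswith c p = true
      · have : p = ph := pv_disj c ph p hph (hsub p (by simp)) hsw hs
        subst this
        rw [if_pos hs]
        simp [PySem.Dict.getD]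
      · have hne : ph ≠ p := by intro he; rw [← he] at hs; exact hs hsw
        have hmem' : ph ∈ rest := by
          rcases List.mem_cons.mp hmem with h1 | h1
          · exact absurd h1 hne
          · exact h1
        rw [if_neg (by simpa using hs)]
        exact ih hmem' (fun q hq => hsub q (List.mem_cons_of_mem _ hq))
  exact key pvPhases hph (fun p hp => hp)

theorem pv_bucket_fold (cols : List String) (ph : String) (hph : ph ∈ pvPhases) :
    ∀ d : PySem.Dict String (List String × List String),
      (cols.foldl (fun d c => pvBucketAdd d c pvPhases) d).getD ph ([], []) =
        ((d.getD ph ([], [])).1 ++ cols.filter (fun c => PySem.Str.startswith c ph),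
         (d.getD ph ([], [])).2 ++ (cols.filter (fun c => PySem.Str.startswith c ph)).filter pvPreferred) := by
  induction cols with
  | nil => intro d; simp
  | cons c rest ih =>
    intro d
    simp only [List.foldl_cons]
    by_cases hs : PySem.Str.startswith c ph = true
    · rw [ih (pvBucketAdd d c pvPhases)]
      rw [pvBucketAdd_getD_of_sw d c ph hs hph]
      have hs' : PySem.Chars.startswith c.toList ph.toList = true := by simpa using hs
      by_cases hp : pvPreferred c = true
      · simp [hs', hp, List.filter_filter]
      · simp [hs', hp, List.filter_filter]
    · rw [ih (pvBucketAdd d c pvPhases)]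
      rw [pvBucketAdd_getD_of_not_sw d c ph (by simpa using hs)]
      have hs' : PySem.Chars.startswith c.toList ph.toList = false := by
        simpa using (Bool.not_eq_true _).mp hs
      simp [hs']

theorem pv_d0_getD (ph : String) (hph : ph ∈ pvPhases) :
    (pvPhases.foldl (fun d p => d.insert p ([], [])) (PySem.Dict.empty (κ := String) (ν := List String × List String))).getD ph ([], []) = ([], []) := by
  fin_cases hph <;> rfl

-- ===== VERDICT (by name: the statement is the Claim_ definition above) =====
theorem pick_mission_features_spec : Claim_equal_pick_mission_features := by
  intro cols max_per_phase _
  unfold Spec_pick_mission_features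
  unfold pick_mission_features pick_mission_features_alt
  have h1 := pv_bucket_fold cols "takeoff_" (by decide)
  have h2 := pv_bucket_fold cols "hover_" (by decide)
  have h3 := pv_bucket_fold cols "cruise_" (by decide)
  have h4 := pv_bucket_fold cols "landing_" (by decide)
  have h5 := pv_bucket_fold cols "steady_" (by decide)
  have g1 := pv_d0_getD "takeoff_" (by decide)
  have g2 := pv_d0_getD "hover_" (by decide)
  have g3 := pv_d0_getD "cruise_" (by decide)
  have g4 := pv_d0_getD "landing_" (by decide)
  have g5 := pv_d0_getD "steady_" (by decide)
  simp only [pvPhases, List.foldl_cons, List.foldl_nil] at h1 h2 h3 h4 h5 g1 g2 g3 g4 g5 ⊢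
  rw [h1, h2, h3, h4, h5, g1, g2, g3, g4, g5]
  simp
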